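-- pv_equiv track=rewrite | github.com/razinkele/SESTool | MarineSABRES_SES_Shiny/scripts/_archive/extract_missing_translations.py | find_translation_in_backup
-- ===== SOURCE A (Python) =====
-- def find_translation_in_backup(key, backup):
--     """
--     Find a translation entry in backup by key or by matching English text.
--     Handles both keyed entries and flat-key entries.
--     """
--     # Try exact key match first
--     for entry in backup['translation']:
--         if entry.get('key') == key:
--             return entry
--
--     # Try matching by truncated English text in key
--     # Extract the last part of the key (after last dot) which might be truncated English
--     key_suffix = key.split('.')[-1]
--
--     for entry in backup['translation']:
--         en_text = entry.get('en', '')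
--         # Check if English text (normalized) matches or starts with key suffix
--         normalized_en = en_text.lower().replace(' ', '_').replace('-', '_')
--         if normalized_en.startswith(key_suffix.lower()) or key_suffix.lower() in normalized_en:
--             return entry
--
--     return None
-- ===== SOURCE B (Python) =====
-- def find_translation_in_backup(key, backup):
--     """Rank-and-minimum formulation: rank each entry (0 = exact key match,
--     1 = fuzzy English-text match, 2 = no match) and return the first entry
--     of minimal rank via a stable min, or None when nothing ranks below 2."""
--     entries = backup['translation']
--     key_suffix = key.split('.')[-1].lower()
--
--     def rank(entry):
--         if entry.get('key') == key:
--             return 0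
--         normalized_en = entry.get('en', '').lower().replace(' ', '_').replace('-', '_')
--         return 1 if key_suffix in normalized_en else 2
--
--     best = min(entries, key=rank, default=None)
--     return best if best is not None and rank(best) < 2 else None
-- ===== Notes on version B (the rewrite author's own statement) =====
-- stated objective: alternative
-- what changed: A's two sequential scans (exact key match first, then a fuzzy English-text scan) are replaced by ranking every entry (0 exact, 1 fuzzy, 2 none) and taking the first entry of minimal rank with a stable min, returning None when the minimum rank is 2; the redundant startswith test (subsumed by substring containment) disappears.
-- outside the precondition, e.g. on find_translation_in_backup('x', {}): A raises KeyError, B raises KeyError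
import Mathlib
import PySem

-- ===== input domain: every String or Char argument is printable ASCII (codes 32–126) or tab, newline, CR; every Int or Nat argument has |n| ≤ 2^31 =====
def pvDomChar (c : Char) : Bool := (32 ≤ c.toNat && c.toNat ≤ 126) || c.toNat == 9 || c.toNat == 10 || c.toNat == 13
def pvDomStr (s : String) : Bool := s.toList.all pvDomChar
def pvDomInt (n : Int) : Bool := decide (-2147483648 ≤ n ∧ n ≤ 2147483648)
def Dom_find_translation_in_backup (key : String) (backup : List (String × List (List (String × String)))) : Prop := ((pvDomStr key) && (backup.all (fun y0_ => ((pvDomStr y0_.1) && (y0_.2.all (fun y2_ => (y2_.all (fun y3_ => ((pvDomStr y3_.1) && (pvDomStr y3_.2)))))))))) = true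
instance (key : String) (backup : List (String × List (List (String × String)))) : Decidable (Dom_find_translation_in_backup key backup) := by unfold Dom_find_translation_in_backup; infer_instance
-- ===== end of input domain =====

-- B replaces A's two sequential scans by a rank-and-stable-minimum formulation
-- (objective: alternative algorithm; same asymptotic cost).

-- ===== PORT A =====
-- first loop of A: return the first entry whose 'key' equals key
def pvExactScanA (key : String) : List (List (String × String)) → Option (List (String × String))
  | [] => none
  | e :: rest =>
    if (PySem.Dict.mk e).get? "key" == some key then some e else pvExactScanA key rest

-- normalized_en = en.lower().replace(' ', '_').replace('-', '_')
def pvNormEn (e : List (String × String)) : String :=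
  PySem.Str.replace (PySem.Str.replace (PySem.Str.lower ((PySem.Dict.mk e).getD "en" "")) " " "_") "-" "_"

-- second loop of A: first entry whose normalized en starts with / contains the suffix
def pvFuzzyScanA (ks : String) : List (List (String × String)) → Option (List (String × String))
  | [] => none
  | e :: rest =>
    if PySem.Str.startswith (pvNormEn e) ks || PySem.Str.isIn ks (pvNormEn e)
    then some e else pvFuzzyScanA ks rest

def find_translation_in_backup (key : String) (backup : List (String × List (List (String × String)))) : Option (List (String × String)) :=
  match (PySem.Dict.mk backup).get? "translation" with
  | none => none   -- Python raises KeyError here; excluded by Pre_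
  | some tr =>
    match pvExactScanA key tr with
    | some e => some e
    | none =>
      let ks := PySem.Str.lower ((((PySem.Str.split? key ".").getD []).getLast?).getD "")
      pvFuzzyScanA ks tr

-- ===== PORT B =====
-- rank(entry): 0 = exact key match, 1 = fuzzy English-text match, 2 = no match
def pvRankB (key ks : String) (e : List (String × String)) : Int :=
  if (PySem.Dict.mk e).get? "key" == some key then 0
  else if PySem.Str.isIn ks
    (PySem.Str.replace (PySem.Str.replace (PySem.Str.lower ((PySem.Dict.mk e).getD "en" "")) " " "_") "-" "_")
  then 1 else 2

-- best = min(entries, key=rank, default=None); best if rank(best) < 2 else None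
def find_translation_in_backup_alt (key : String) (backup : List (String × List (List (String × String)))) : Option (List (String × String)) :=
  match (PySem.Dict.mk backup).get? "translation" with
  | none => none   -- Python raises KeyError here; excluded by Pre_
  | some entries =>
    let ks := PySem.Str.lower ((((PySem.Str.split? key ".").getD []).getLast?).getD "")
    match PySem.List.min? entries (pvRankB key ks) with
    | some best => if pvRankB key ks best < 2 then some best else none
    | none => none

-- ===== PRECONDITION & SPEC =====
-- Pre_ excludes exactly the inputs where backup['translation'] raises KeyError in both programs.
def Pre_find_translation_in_backup (key : String) (backup : List (String × List (List (String × String)))) : Prop :=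
  (PySem.Dict.mk backup).contains "translation" = true
instance (key : String) (backup : List (String × List (List (String × String)))) : Decidable (Pre_find_translation_in_backup key backup) := by unfold Pre_find_translation_in_backup; infer_instance

def pvWitness_find_translation_in_backup : String × (List (String × List (List (String × String)))) :=
  ("a.b", [("translation", [[("key", "x"), ("en", "B text")]])])

def Spec_find_translation_in_backup (key : String) (backup : List (String × List (List (String × String)))) (out : Option (List (String × String))) : Prop := out = find_translation_in_backup_alt key backup
instance (key : String) (backup : List (String × List (List (String × String)))) (out : Option (List (String × String))) : Decidable (Spec_find_translation_in_backup key backup out) := by unfold Spec_find_translation_in_backup; infer_instance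

-- ===== CLAIM (what is proved, stated in full; the proofs are below) =====
def Claim_equal_find_translation_in_backup : Prop := ∀ (key : String) (backup : List (String × List (List (String × String)))), Dom_find_translation_in_backup key backup → Pre_find_translation_in_backup key backup → Spec_find_translation_in_backup key backup (find_translation_in_backup key backup)

-- ===== LEMMAS AND PROOFS =====

-- proof-side abbreviations for the two boolean conditions
def pvEx (key : String) (e : List (String × String)) : Bool :=
  (PySem.Dict.mk e).get? "key" == some key

def pvFz (ks : String) (e : List (String × String)) : Bool :=
  PySem.Str.isIn ks (pvNormEn e)

-- A's combined result (exact scan first, then fuzzy scan) as one function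
def pvResA (key ks : String) (tr : List (List (String × String))) : Option (List (String × String)) :=
  match pvExactScanA key tr with
  | some e => some e
  | none => pvFuzzyScanA ks tr

-- the post-processing of B's min
def pvPostB (key ks : String) : Option (List (String × String)) → Option (List (String × String))
  | some m => if pvRankB key ks m < 2 then some m else none
  | none => none

-- A's fuzzy condition reduces to plain containment: a prefix is also a substring.
theorem pvFuzzyCond_eq (ks n : String) :
    (PySem.Str.startswith n ks || PySem.Str.isIn ks n) = PySem.Str.isIn ks n := by
  cases hs : PySem.Str.startswith n ks with
  | false => simp [hs]
  | true =>
    have hpre : ks.toList <+: n.toList := by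
      simpa [PySem.Str.startswith_eq, PySem.Chars.startswith_iff] using hs
    have hin : PySem.Chars.isIn ks.toList n.toList = true :=
      (PySem.Chars.isIn_iff_infix ks.toList n.toList).mpr hpre.isInfix
    simp [hin]

theorem pvExactA_cons (key : String) (e : List (String × String))
    (rest : List (List (String × String))) :
    pvExactScanA key (e :: rest) = if pvEx key e then some e else pvExactScanA key rest := rfl

theorem pvFuzzyA_cons (ks : String) (e : List (String × String))
    (rest : List (List (String × String))) :
    pvFuzzyScanA ks (e :: rest) = if pvFz ks e then some e else pvFuzzyScanA ks rest := by
  conv_lhs => rw [pvFuzzyScanA]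
  rw [pvFuzzyCond_eq]
  simp only [pvFz]
  rfl

-- rank takes exactly the values 0 / 1 / 2, tied to the two conditions
theorem pvRank_cases (key ks : String) (e : List (String × String)) :
    (pvRankB key ks e = 0 ∧ pvEx key e = true) ∨
    (pvRankB key ks e = 1 ∧ pvEx key e = false ∧ pvFz ks e = true) ∨
    (pvRankB key ks e = 2 ∧ pvEx key e = false ∧ pvFz ks e = false) := by
  unfold pvRankB
  split_ifs with h1 h2
  · exact Or.inl ⟨rfl, h1⟩
  · exact Or.inr (Or.inl ⟨rfl, by simpa [pvEx] using h1, h2⟩)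
  · exact Or.inr (Or.inr ⟨rfl, by simpa [pvEx] using h1, by simpa [pvFz, pvNormEn] using h2⟩)

set_option maxHeartbeats 1000000 in
-- the min?-fold, post-processed, characterised against A's two scans
theorem pvFoldMin_char (key ks : String)
    (f : Option (List (String × String)) → List (String × String) → Option (List (String × String)))
    (hf : ∀ acc x, f acc x =
      match acc with
      | none => some x
      | some m => if pvRankB key ks x < pvRankB key ks m then some x else some m)
    (tr : List (List (String × String)))
    (acc : Option (List (String × String))) :
    pvPostB key ks (List.foldl f acc tr) =
      match acc with
      | none => pvResA key ks tr
      | some m =>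
        if pvRankB key ks m = 0 then some m
        else if pvRankB key ks m = 1 then
          (match pvExactScanA key tr with | some e => some e | none => some m)
        else pvResA key ks tr := by
  induction tr generalizing acc with
  | nil =>
    cases acc with
    | none => rfl
    | some m =>
      rcases pvRank_cases key ks m with ⟨hrm, _⟩ | ⟨hrm, _, _⟩ | ⟨hrm, _, _⟩ <;>
        simp [List.foldl_nil, pvPostB, pvResA, pvExactScanA, pvFuzzyScanA, hrm]
  | cons e rest ih =>
    cases acc with
    | none =>
      rw [List.foldl_cons, hf]
      dsimp only
      rw [ih]
      rcases pvRank_cases key ks e with ⟨hre, hE⟩ | ⟨hre, hE, hF⟩ | ⟨hre, hE, hF⟩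
      · simp [hre, hE, pvResA, pvExactA_cons, pvFuzzyA_cons]
      · simp [hre, hE, hF, pvResA, pvExactA_cons, pvFuzzyA_cons]
      · simp [hre, hE, hF, pvResA, pvExactA_cons, pvFuzzyA_cons]
    | some m =>
      rw [List.foldl_cons, hf]
      dsimp only
      rcases pvRank_cases key ks e with ⟨hre, hE⟩ | ⟨hre, hE, hF⟩ | ⟨hre, hE, hF⟩ <;>
        rcases pvRank_cases key ks m with ⟨hrm, hEm⟩ | ⟨hrm, hEm, hFm⟩ | ⟨hrm, hEm, hFm⟩
      · simp only [hre, hrm]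
        rw [if_neg (by norm_num)]
        rw [ih]
        simp [hre, hrm, hE, hEm, pvPostB, pvResA, pvExactA_cons, pvFuzzyA_cons]
      · simp only [hre, hrm]
        rw [if_pos (by norm_num)]
        rw [ih]
        simp [hre, hrm, hE, hEm, hFm, pvPostB, pvResA, pvExactA_cons, pvFuzzyA_cons]
      · simp only [hre, hrm]
        rw [if_pos (by norm_num)]
        rw [ih]
        simp [hre, hrm, hE, hEm, hFm, pvPostB, pvResA, pvExactA_cons, pvFuzzyA_cons]
      · simp only [hre, hrm]
        rw [if_neg (by norm_num)]
        rw [ih]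
        simp [hre, hrm, hE, hF, hEm, pvPostB, pvResA, pvExactA_cons, pvFuzzyA_cons]
      · simp only [hre, hrm]
        rw [if_neg (by norm_num)]
        rw [ih]
        simp [hre, hrm, hE, hF, hEm, hFm, pvPostB, pvResA, pvExactA_cons, pvFuzzyA_cons]
      · simp only [hre, hrm]
        rw [if_pos (by norm_num)]
        rw [ih]
        simp [hre, hrm, hE, hF, hEm, hFm, pvPostB, pvResA, pvExactA_cons, pvFuzzyA_cons]
      · simp only [hre, hrm]
        rw [if_neg (by norm_num)]
        rw [ih]
        simp [hre, hrm, hE, hF, hEm, pvPostB, pvResA, pvExactA_cons, pvFuzzyA_cons]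
      · simp only [hre, hrm]
        rw [if_neg (by norm_num)]
        rw [ih]
        simp [hre, hrm, hE, hF, hEm, hFm, pvPostB, pvResA, pvExactA_cons, pvFuzzyA_cons]
      · simp only [hre, hrm]
        rw [if_neg (by norm_num)]
        rw [ih]
        simp [hre, hrm, hE, hF, hEm, hFm, pvPostB, pvResA, pvExactA_cons, pvFuzzyA_cons]

-- ===== VERDICT (by name: the statement is the Claim_ definition above) =====
theorem find_translation_in_backup_spec : Claim_equal_find_translation_in_backup := by
  intro key backup _ _
  show find_translation_in_backup key backup = find_translation_in_backup_alt key backup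
  simp only [find_translation_in_backup, find_translation_in_backup_alt, PySem.List.min?]
  cases h : (PySem.Dict.mk backup).get? "translation" with
  | none => rfl
  | some tr =>
    simp only [h]
    have hpost : ∀ (o : Option (List (String × String))),
        (match o with
         | some best =>
           if pvRankB key (PySem.Str.lower ((((PySem.Str.split? key ".").getD []).getLast?).getD "")) best < 2
           then some best else none
         | none => none) =
        pvPostB key (PySem.Str.lower ((((PySem.Str.split? key ".").getD []).getLast?).getD "")) o := by
      intro o; cases o <;> rfl
    rw [hpost]
    refine (pvFoldMin_char key (PySem.Str.lower ((((PySem.Str.split? key ".").getD []).getLast?).getD "")) ?_ ?_ tr none).symm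
    intro acc x
    cases acc <;> rfl
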